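-- pv_equiv track=rewrite | github.com/abiolaogu/tdb-fork | python-ai/tdbai/promptql/executor.py | _execute_project
-- ===== SOURCE A (Python) =====
-- from typing import Any, Dict, List, Optional, AsyncIterator, Callable, Union
--
-- def _execute_project(
--
--     data: Optional[List[Dict]],
--     fields: List[str],
-- ) -> List[Dict]:
--     """Execute projection (select specific fields)."""
--     if not data or not fields:
--         return data or []
--
--     if "*" in fields:
--         return data
--
--     result = []
--     for record in data:
--         projected = {}
--         for field in fields:
--             if field in record:
--                 projected[field] = record[field]
--         result.append(projected)
--
--     return result
-- ===== SOURCE B (Python) =====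
-- def _execute_project(data, fields):
--     """Execute projection (select specific fields) — field-major (column-wise) build."""
--     if not data or not fields:
--         return data or []
--
--     if "*" in fields:
--         return data
--
--     rows = [{} for _ in data]
--     seen = set()
--     for field in fields:
--         if field in seen:
--             continue
--         seen.add(field)
--         for i, record in enumerate(data):
--             if field in record:
--                 rows[i][field] = record[field]
--     return rows
-- ===== Notes on version B (the rewrite author's own statement) =====
-- stated objective: alternative
-- what changed: B builds the projection field-major (column-wise): one pass over deduplicated fields, filling each output record's entry for that field across all rows, instead of A's row-major inner loop over fields per record.
import Mathlib
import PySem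

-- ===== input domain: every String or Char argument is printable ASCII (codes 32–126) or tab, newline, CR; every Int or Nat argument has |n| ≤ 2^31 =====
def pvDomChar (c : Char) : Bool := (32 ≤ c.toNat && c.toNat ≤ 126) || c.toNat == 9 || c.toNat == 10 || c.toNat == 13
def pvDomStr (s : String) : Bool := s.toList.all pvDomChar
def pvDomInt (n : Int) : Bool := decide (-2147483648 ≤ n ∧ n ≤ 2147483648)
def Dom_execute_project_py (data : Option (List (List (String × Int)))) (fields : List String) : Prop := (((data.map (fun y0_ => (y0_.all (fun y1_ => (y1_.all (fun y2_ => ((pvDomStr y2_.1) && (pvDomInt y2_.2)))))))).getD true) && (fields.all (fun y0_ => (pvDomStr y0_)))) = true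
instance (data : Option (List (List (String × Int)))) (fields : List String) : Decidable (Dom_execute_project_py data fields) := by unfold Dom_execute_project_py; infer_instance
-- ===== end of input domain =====

-- B builds the projection field-major (column-wise) over deduplicated fields instead of
-- A's row-major per-record loop over fields; same values and same key order.

-- ===== PORT A =====
-- inner loop body: 'for field in fields: if field in record: projected[field] = record[field]'
def pvProjStepA (record : List (String × Int)) (proj : PySem.Dict String Int) (f : String) : PySem.Dict String Int :=
  if (PySem.Dict.mk record).contains f then proj.insert f ((PySem.Dict.mk record).getD f 0) else proj

def execute_project_py (data : Option (List (List (String × Int)))) (fields : List String) : List (List (String × Int)) :=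
  -- 'if not data or not fields: return data or []'
  if data = none ∨ data = some [] ∨ fields = [] then data.getD []
  -- 'if "*" in fields: return data'
  else if fields.contains "*" then data.getD []
  else
    -- result = []; for record in data: projected = {}; …; result.append(projected)
    (data.getD []).foldl
      (fun res record => res ++ [(fields.foldl (pvProjStepA record) PySem.Dict.empty).items]) []

-- ===== PORT B =====
-- inner loop: 'for i, record in enumerate(data): if field in record: rows[i][field] = record[field]'
def pvFillColB (f : String) (data : List (List (String × Int))) (rows : List (PySem.Dict String Int)) : List (PySem.Dict String Int) :=
  (PySem.List.enumerate data).foldl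
    (fun rows p =>
      if (PySem.Dict.mk p.2).contains f then
        rows.set p.1.toNat ((rows.getD p.1.toNat PySem.Dict.empty).insert f ((PySem.Dict.mk p.2).getD f 0))
      else rows) rows

def execute_project_py_alt (data : Option (List (List (String × Int)))) (fields : List String) : List (List (String × Int)) :=
  if data = none ∨ data = some [] ∨ fields = [] then data.getD []
  else if fields.contains "*" then data.getD []
  else
    let d := data.getD []
    -- rows = [{} for _ in data]; seen = set(); for field in fields: skip seen, else fill the column
    let st := fields.foldl
      (fun (st : List (PySem.Dict String Int) × PySem.Set String) f =>
        if PySem.Set.contains st.2 f then st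
        else (pvFillColB f d st.1, PySem.Set.add st.2 f))
      (d.map (fun _ => PySem.Dict.empty), PySem.Set.ofList [])
    st.1.map (fun r => r.items)

-- ===== PRECONDITION & SPEC =====
def Spec_execute_project_py (data : Option (List (List (String × Int)))) (fields : List String) (out : List (List (String × Int))) : Prop := out = execute_project_py_alt data fields
instance (data : Option (List (List (String × Int)))) (fields : List String) (out : List (List (String × Int))) : Decidable (Spec_execute_project_py data fields out) := by unfold Spec_execute_project_py; infer_instance

-- ===== CLAIM (what is proved, stated in full; the proofs are below) =====
def Claim_equal_execute_project_py : Prop := ∀ (data : Option (List (List (String × Int)))) (fields : List String), Dom_execute_project_py data fields → Spec_execute_project_py data fields (execute_project_py data fields)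

-- ===== LEMMAS AND PROOFS =====

-- A's projection of one record after processing the field list P, from accumulator acc
def pvProjA (record : List (String × Int)) (P : List String) (acc : PySem.Dict String Int) : PySem.Dict String Int :=
  P.foldl (pvProjStepA record) acc

theorem pvProjA_append (record : List (String × Int)) (P Q : List String) (acc : PySem.Dict String Int) :
    pvProjA record (P ++ Q) acc = pvProjA record Q (pvProjA record P acc) := by
  simp [pvProjA, List.foldl_append]

theorem pvProjA_keys_nodup (record : List (String × Int)) (P : List String)
    (acc : PySem.Dict String Int) (h : acc.keys.Nodup) : (pvProjA record P acc).keys.Nodup := by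
  induction P generalizing acc with
  | nil => exact h
  | cons f fs ih =>
    simp only [pvProjA, List.foldl_cons]
    apply ih
    unfold pvProjStepA
    split
    · exact PySem.Dict.nodup_keys_insert _ _ _ h
    · exact h

theorem pvProjA_get? (record : List (String × Int)) (P : List String)
    (acc : PySem.Dict String Int) (x : String) :
    (pvProjA record P acc).get? x =
      if x ∈ P ∧ (PySem.Dict.mk record).contains x then (PySem.Dict.mk record).get? x
      else acc.get? x := by
  induction P generalizing acc with
  | nil => simp [pvProjA]
  | cons f fs ih =>
    simp only [pvProjA, List.foldl_cons]
    rw [show List.foldl (pvProjStepA record) (pvProjStepA record acc f) fs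
          = pvProjA record fs (pvProjStepA record acc f) from rfl, ih]
    by_cases hxf : x = f
    · subst hxf
      by_cases hc : (PySem.Dict.mk record).contains x
      · rw [if_pos (show x ∈ x :: fs ∧ (PySem.Dict.mk record).contains x = true from ⟨by simp, hc⟩)]
        split_ifs with h
        · rfl
        · unfold pvProjStepA
          rw [if_pos hc, PySem.Dict.get?_insert_self, PySem.Dict.getD_eq_get?_getD]
          rcases hval : (PySem.Dict.mk record).get? x with _ | v
          · rw [PySem.Dict.contains_eq_isSome_get?, hval] at hc; simp at hc
          · simp
      · rw [if_neg (fun h => hc h.2), if_neg (fun h => hc h.2)]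
        unfold pvProjStepA
        rw [if_neg hc]
    · have hiff : (x ∈ fs ∧ (PySem.Dict.mk record).contains x = true)
          ↔ (x ∈ f :: fs ∧ (PySem.Dict.mk record).contains x = true) := by
        constructor
        · rintro ⟨hm, hcx⟩; exact ⟨List.mem_cons_of_mem _ hm, hcx⟩
        · rintro ⟨hm, hcx⟩
          rcases List.mem_cons.mp hm with h | h
          · exact absurd h hxf
          · exact ⟨h, hcx⟩
      have hstep : (pvProjStepA record acc f).get? x = acc.get? x := by
        unfold pvProjStepA
        split
        · rw [PySem.Dict.get?_insert_of_ne _ _ hxf]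
        · rfl
      rw [hstep]
      split_ifs with h1 h2
      · rfl
      · exact absurd (hiff.mp h1) h2
      · rename_i h2
        exact absurd (hiff.mpr h2) h1
      · rfl

-- inserting a key already present with its stored value is a no-op (keys nodup)
theorem pvInsert_same (d : PySem.Dict String Int) (k : String) (v : Int)
    (hnd : d.keys.Nodup) (h : d.get? k = some v) : d.insert k v = d := by
  apply PySem.Dict.ext
  have hc : d.contains k = true := by
    rw [PySem.Dict.contains_eq_isSome_get?, h]; rfl
  rw [PySem.Dict.items_insert_of_contains _ _ hc]
  have step : ∀ p ∈ d.items, (if (p.1 == k) = true then (k, v) else p) = p := by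
    intro p hp
    by_cases hpk : p.1 = k
    · have hmem : d.get? p.1 = some p.2 :=
        (PySem.Dict.get?_eq_some_iff_mem_items d p.1 p.2 hnd).mpr hp
      rw [hpk, h] at hmem
      have hv : v = p.2 := Option.some_inj.mp hmem
      simp only [hpk, beq_self_eq_true, if_true]
      rw [← hpk, hv]
    · simp [hpk]
  rw [List.map_congr_left step]; simp

-- if f was already processed (f ∈ P), processing it again changes nothing
theorem pvProjA_snoc_mem (record : List (String × Int)) (P : List String) (f : String)
    (hf : f ∈ P) : pvProjA record (P ++ [f]) PySem.Dict.empty = pvProjA record P PySem.Dict.empty := by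
  rw [pvProjA_append]
  show pvProjStepA record (pvProjA record P PySem.Dict.empty) f = _
  unfold pvProjStepA
  split
  · rename_i hc
    apply pvInsert_same
    · exact pvProjA_keys_nodup _ _ _ (by simp [PySem.Dict.empty, PySem.Dict.keys])
    · rw [pvProjA_get?]
      simp only [hf, hc, and_self, if_true]
      rw [PySem.Dict.getD_eq_get?_getD]
      rcases h : (PySem.Dict.mk record).get? f with _ | v
      · rw [PySem.Dict.contains_eq_isSome_get?, h] at hc; simp at hc
      · simp
  · rfl

-- one step of B's inner enumerate loop (definitionally the lambda in pvFillColB)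
def pvStepB (f : String) (rows : List (PySem.Dict String Int)) (p : Int × List (String × Int)) : List (PySem.Dict String Int) :=
  if (PySem.Dict.mk p.2).contains f then
    rows.set p.1.toNat ((rows.getD p.1.toNat PySem.Dict.empty).insert f ((PySem.Dict.mk p.2).getD f 0))
  else rows

-- B's column fill acts as a map over the records (with an already-filled prefix)
theorem pvFillColB_aux (f : String) (g : List (String × Int) → PySem.Dict String Int)
    (d : List (List (String × Int))) :
    ∀ pre : List (PySem.Dict String Int),
    (PySem.List.enumerate d (pre.length : Int)).foldl (pvStepB f) (pre ++ d.map g)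
    = pre ++ d.map (fun rec => pvProjStepA rec (g rec) f) := by
  induction d with
  | nil => intro pre; simp [PySem.List.enumerate]
  | cons rec rest ih =>
    intro pre
    rw [PySem.List.enumerate_cons, List.foldl_cons]
    have hstep : pvStepB f (pre ++ (rec :: rest).map g) ((pre.length : Int), rec)
        = (pre ++ [pvProjStepA rec (g rec) f]) ++ rest.map g := by
      unfold pvStepB pvProjStepA
      by_cases hc : (PySem.Dict.mk rec).contains f
      · rw [if_pos hc, if_pos hc]
        simp [List.getD]
      · rw [if_neg hc, if_neg hc]
        simp
    rw [hstep]
    have hlen : ((pre ++ [pvProjStepA rec (g rec) f]).length : Int) = (pre.length : Int) + 1 := by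
      simp
    have := ih (pre ++ [pvProjStepA rec (g rec) f])
    rw [hlen] at this
    rw [this]
    simp

-- the invariant of B's outer loop: rows = per-record A-projection of the processed prefix,
-- seen = the set of processed fields
theorem pvLoopB_inv (d : List (List (String × Int))) :
    ∀ (fields P : List String),
    fields.foldl
      (fun (st : List (PySem.Dict String Int) × PySem.Set String) f =>
        if PySem.Set.contains st.2 f then st
        else (pvFillColB f d st.1, PySem.Set.add st.2 f))
      (d.map (fun rec => pvProjA rec P PySem.Dict.empty), PySem.Set.ofList P)
    = (d.map (fun rec => pvProjA rec (P ++ fields) PySem.Dict.empty), PySem.Set.ofList (P ++ fields)) := by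
  intro fields
  induction fields with
  | nil => intro P; simp
  | cons f fs ih =>
    intro P
    simp only [List.foldl_cons]
    by_cases hf : f ∈ P
    · have hcont : PySem.Set.contains (PySem.Set.ofList P) f = true := by
        rw [PySem.Set.contains_iff]; exact (PySem.Set.mem_ofList P f).mpr hf
      rw [hcont, if_pos rfl]
      have hmap : d.map (fun rec => pvProjA rec P PySem.Dict.empty)
          = d.map (fun rec => pvProjA rec (P ++ [f]) PySem.Dict.empty) := by
        apply List.map_congr_left; intro rec _; rw [pvProjA_snoc_mem rec P f hf]
      have hset : PySem.Set.ofList P = PySem.Set.ofList (P ++ [f]) := by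
        rw [PySem.Set.ofList_append, PySem.Set.update_cons, PySem.Set.update_nil,
          PySem.Set.add_of_mem ((PySem.Set.mem_ofList P f).mpr hf)]
      rw [hmap, hset, ih (P ++ [f])]
      simp
    · have hcont : PySem.Set.contains (PySem.Set.ofList P) f = false := by
        rw [Bool.eq_false_iff]
        intro hcon
        exact hf ((PySem.Set.mem_ofList P f).mp ((PySem.Set.contains_iff _ _).mp hcon))
      rw [hcont, if_neg (by simp)]
      have hfill : pvFillColB f d (d.map (fun rec => pvProjA rec P PySem.Dict.empty))
          = d.map (fun rec => pvProjA rec (P ++ [f]) PySem.Dict.empty) := by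
        have hbridge : ∀ rows, pvFillColB f d rows
            = (PySem.List.enumerate d 0).foldl (pvStepB f) rows := fun _ => rfl
        have := pvFillColB_aux f (fun rec => pvProjA rec P PySem.Dict.empty) d []
        simp only [List.length_nil, Nat.cast_zero, List.nil_append] at this
        rw [hbridge, this]
        apply List.map_congr_left; intro rec _
        rw [pvProjA_append]; rfl
      have hset : PySem.Set.add (PySem.Set.ofList P) f = PySem.Set.ofList (P ++ [f]) := by
        rw [PySem.Set.ofList_append, PySem.Set.update_cons, PySem.Set.update_nil]
      rw [hfill, hset, ih (P ++ [f])]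
      simp

-- ===== VERDICT (by name: the statement is the Claim_ definition above) =====
theorem execute_project_py_spec : Claim_equal_execute_project_py := by
  intro data fields _
  show execute_project_py data fields = execute_project_py_alt data fields
  unfold execute_project_py execute_project_py_alt
  by_cases h1 : data = none ∨ data = some [] ∨ fields = []
  · simp [h1]
  · rw [if_neg h1, if_neg h1]
    by_cases h2 : fields.contains "*"
    · have h2' : "*" ∈ fields := by simpa using h2
      simp [h2']
    · rw [if_neg h2, if_neg h2]
      have hinit : (data.getD []).map (fun (_ : List (String × Int)) => PySem.Dict.empty)
          = (data.getD []).map (fun rec => pvProjA rec [] PySem.Dict.empty) := rfl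
      simp only [hinit]
      rw [pvLoopB_inv (data.getD []) fields []]
      simp only [List.nil_append]
      rw [PySem.List.foldl_append_singleton_eq_map
        (fun record => (fields.foldl (pvProjStepA record) PySem.Dict.empty).items) (data.getD []) []]
      simp [pvProjA, List.map_map, Function.comp]
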